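-- pv_equiv track=rewrite | github.com/quaziashfaq/programming | contest_sites/codility/prefix-sums.py | mushrooms
-- ===== SOURCE A (Python) =====
-- def prefix_sums(a):
--     n = len(a)
--     p = [0] * (n+1)
--
--     for i in range(len(a)):
--         p[i+1] = p[i] + a[i]
--
--     return p
--
-- def count_total(p, x, y):
--     return p[y+1] - p[x]
--
-- def mushrooms(A, k, m):
--     n = len(A)
--     p = prefix_sums(A)
--     max_mushrooms_count = 0
--     mushrooms_picked = 0
--
--     # going left first
--     for i in range(min(m, k) + 1):
--         left_position = k - i
--         right_position = min(n-1, max(k, k+(m-2*i)))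
--         mushrooms_picked = max(mushrooms_picked, count_total(p, left_position, right_position))
--
--     # going right first
--     for i in range(min(m+1, n-k)):
--         left_position = max(0, min(k, k-(m-2*i)))
--         right_position = k + i
--         mushrooms_picked = max(mushrooms_picked, count_total(p, left_position, right_position))
--
--     return mushrooms_picked
-- ===== SOURCE B (Python) =====
-- def mushrooms(A, k, m):
--     n = len(A)
--     best = 0
--     # going left first
--     for i in range(min(m, k) + 1):
--         left = k - i
--         right = min(n - 1, max(k, k + (m - 2 * i)))
--         best = max(best, sum(A[left:right + 1]))
--     # going right first
--     for i in range(min(m + 1, n - k)):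
--         left = max(0, min(k, k - (m - 2 * i)))
--         best = max(best, sum(A[left:k + i + 1]))
--     return best
-- ===== Notes on version B (the rewrite author's own statement) =====
-- stated objective: simpler
-- what changed: Drops the prefix_sums helper and table entirely: each candidate interval is summed directly with sum(A[left:right+1]) over the slice, keeping only the two position loops.
-- outside the precondition, e.g. on mushrooms([3, -1, -1, -2, 3, 3], -4, 7): A returns 5, B returns 3; on mushrooms([1, 2, 3], 4, 1): A raises IndexError, B returns 0
import Mathlib
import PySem

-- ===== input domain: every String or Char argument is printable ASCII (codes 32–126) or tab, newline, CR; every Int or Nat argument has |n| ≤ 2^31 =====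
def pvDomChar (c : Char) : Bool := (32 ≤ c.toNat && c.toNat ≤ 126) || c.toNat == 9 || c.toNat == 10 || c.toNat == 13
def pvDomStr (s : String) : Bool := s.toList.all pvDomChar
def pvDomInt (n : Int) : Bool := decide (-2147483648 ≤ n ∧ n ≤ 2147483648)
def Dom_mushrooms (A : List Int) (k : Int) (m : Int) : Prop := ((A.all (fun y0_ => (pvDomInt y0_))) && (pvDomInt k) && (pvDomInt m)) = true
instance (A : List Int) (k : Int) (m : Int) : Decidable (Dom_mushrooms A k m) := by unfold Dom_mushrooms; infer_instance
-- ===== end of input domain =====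

-- B drops the prefix-sum table and sums each candidate interval directly from a slice (simpler, no helper functions).

-- ===== PORT A =====
-- prefix_sums(a): p[i+1] = p[i] + a[i] over i in range(len(a)); indices are nonnegative here, so
-- .toNat and the 0-default of pyGetD are exact.
def pvPrefixSums (a : List Int) : List Int :=
  (PySem.List.pyRange 0 (a.length : Int) 1).foldl
    (fun p i => p.set (i + 1).toNat ((PySem.List.pyGetD p i 0) + (PySem.List.pyGetD a i 0)))
    (List.replicate (a.length + 1) 0)

-- count_total(p, x, y) = p[y+1] - p[x]; inside Pre_ both indices are in range (Python would raise outside).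
def pvCountTotal (p : List Int) (x y : Int) : Int :=
  PySem.List.pyGetD p (y + 1) 0 - PySem.List.pyGetD p x 0

def mushrooms (A : List Int) (k : Int) (m : Int) : Int :=
  let n : Int := A.length
  let p := pvPrefixSums A
  let picked :=
    (PySem.List.pyRange 0 (min m k + 1) 1).foldl
      (fun acc i => max acc (pvCountTotal p (k - i) (min (n - 1) (max k (k + (m - 2 * i)))))) 0
  (PySem.List.pyRange 0 (min (m + 1) (n - k)) 1).foldl
    (fun acc i => max acc (pvCountTotal p (max 0 (min k (k - (m - 2 * i)))) (k + i))) picked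

-- ===== PORT B =====
def mushrooms_alt (A : List Int) (k : Int) (m : Int) : Int :=
  let n : Int := A.length
  let best :=
    (PySem.List.pyRange 0 (min m k + 1) 1).foldl
      (fun acc i =>
        max acc (PySem.List.slice A (some (k - i)) (some (min (n - 1) (max k (k + (m - 2 * i))) + 1))).sum) 0
  (PySem.List.pyRange 0 (min (m + 1) (n - k)) 1).foldl
    (fun acc i =>
      max acc (PySem.List.slice A (some (max 0 (min k (k - (m - 2 * i))))) (some (k + i + 1))).sum) best

-- ===== PRECONDITION & SPEC =====
-- Pre_ excludes start positions k outside [0, len(A)] when m ≥ 0 (both loops run then): for k > len(A)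
-- A raises IndexError, and for k < 0 A's value comes from Python negative-index wraparound into the
-- prefix table — a corner no caller of this start-position function would specify (B sums slices there).
-- With m < 0 both loops are empty whatever k is, so those inputs stay inside Pre_.
def Pre_mushrooms (A : List Int) (k : Int) (m : Int) : Prop := (0 ≤ k ∧ k ≤ (A.length : Int)) ∨ m < 0
instance (A : List Int) (k : Int) (m : Int) : Decidable (Pre_mushrooms A k m) := by
  unfold Pre_mushrooms; infer_instance

def pvWitness_mushrooms : List Int × Int × Int := ([1, 2, 3], 1, 2)

def Spec_mushrooms (A : List Int) (k : Int) (m : Int) (out : Int) : Prop := out = mushrooms_alt A k m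
instance (A : List Int) (k : Int) (m : Int) (out : Int) : Decidable (Spec_mushrooms A k m out) := by
  unfold Spec_mushrooms; infer_instance

-- ===== CLAIM (what is proved, stated in full; the proofs are below) =====
def Claim_equal_mushrooms : Prop := ∀ (A : List Int) (k : Int) (m : Int), Dom_mushrooms A k m → Pre_mushrooms A k m → Spec_mushrooms A k m (mushrooms A k m)

-- ===== LEMMAS AND PROOFS =====

-- The fold of prefix_sums, run over range(0, t), fills positions 1..t with prefix sums and leaves the rest 0.
lemma pvPrefixSums_fold_inv (a : List Int) (t : Nat) (ht : t ≤ a.length) :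
    (PySem.List.pyRange 0 (t : Int) 1).foldl
      (fun p i => p.set (i + 1).toNat ((PySem.List.pyGetD p i 0) + (PySem.List.pyGetD a i 0)))
      (List.replicate (a.length + 1) 0)
    = (List.range (a.length + 1)).map (fun j => if j ≤ t then (a.take j).sum else 0) := by
  induction t with
  | zero =>
      rw [PySem.List.pyRange_one_eq_nil (by omega)]
      simp only [List.foldl_nil]
      apply List.ext_getElem
      · simp
      · intro j h1 h2
        simp only [List.getElem_replicate, List.getElem_map, List.getElem_range]
        rcases Nat.eq_zero_or_pos j with hj | hj
        · subst hj; simp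
        · rw [if_neg (by omega)]
  | succ t ih =>
      have ht' : t ≤ a.length := by omega
      rw [show ((t + 1 : Nat) : Int) = (t : Int) + 1 by push_cast; ring,
        PySem.List.pyRange_one_succ_right (by positivity), List.foldl_append, ih ht']
      simp only [List.foldl_cons, List.foldl_nil]
      have hget : PySem.List.pyGetD ((List.range (a.length + 1)).map
          (fun j => if j ≤ t then (a.take j).sum else 0)) (t : Int) 0 = (a.take t).sum := by
        rw [PySem.List.pyGetD_natCast]
        simp [List.getD, Nat.lt_succ_of_le ht']
      have hgeta : PySem.List.pyGetD a (t : Int) 0 = a[t]'(by omega) := by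
        rw [PySem.List.pyGetD_natCast]
        simp [List.getD, List.getElem?_eq_getElem (by omega : t < a.length)]
      rw [hget, hgeta, show ((t : Int) + 1).toNat = t + 1 by omega]
      apply List.ext_getElem
      · simp
      · intro j h1 h2
        simp only [List.length_map, List.length_range] at h1 h2
        rw [List.getElem_set]
        simp only [List.getElem_map, List.getElem_range]
        by_cases hj : t + 1 = j
        · rw [if_pos hj, if_pos (by omega)]
          subst hj
          rw [List.take_add_one, List.sum_append,
            List.getElem?_eq_getElem (by omega : t < a.length)]
          simp
        · rw [if_neg hj]
          by_cases hle : j ≤ t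
          · rw [if_pos hle, if_pos (by omega)]
          · rw [if_neg hle, if_neg (by omega)]

lemma pvPrefixSums_get (a : List Int) (x : Int) (hx : 0 ≤ x) (hxn : x ≤ (a.length : Int)) :
    PySem.List.pyGetD (pvPrefixSums a) x 0 = (a.take x.toNat).sum := by
  unfold pvPrefixSums
  rw [pvPrefixSums_fold_inv a a.length le_rfl]
  rw [show x = (x.toNat : Int) by omega, PySem.List.pyGetD_natCast]
  have hlt : x.toNat < a.length + 1 := by omega
  simp only [List.getD, List.getElem?_map, List.getElem?_range, hlt, Option.map_some,
    Option.getD_some, Int.toNat_natCast]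
  rw [if_pos (by omega : x.toNat ≤ a.length)]

lemma sum_drop_take (a : List Int) (u v : Nat) (h : u ≤ v) :
    ((a.drop u).take (v - u)).sum = (a.take v).sum - (a.take u).sum := by
  conv_rhs => rw [show v = u + (v - u) by omega, List.take_add, List.sum_append]
  ring

-- count_total on the prefix table equals the direct slice sum, for in-range bounds.
lemma pvCount_eq_slice (a : List Int) (x y : Int) (hx : 0 ≤ x) (hxy : x ≤ y + 1)
    (hyn : y + 1 ≤ (a.length : Int)) :
    pvCountTotal (pvPrefixSums a) x y = (PySem.List.slice a (some x) (some (y + 1))).sum := by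
  have hy : 0 ≤ y + 1 := le_trans hx hxy
  rw [PySem.List.slice_toNat a hx hy]
  unfold pvCountTotal
  rw [pvPrefixSums_get a (y + 1) hy hyn, pvPrefixSums_get a x hx (le_trans hxy hyn),
    sum_drop_take a x.toNat (y + 1).toNat (by omega)]

-- ===== VERDICT (by name: the statement is the Claim_ definition above) =====
theorem mushrooms_spec : Claim_equal_mushrooms := by
  intro A k m _ hpre
  unfold Pre_mushrooms at hpre
  unfold Spec_mushrooms mushrooms mushrooms_alt
  simp only []
  have h1 : (PySem.List.pyRange 0 (min m k + 1) 1).foldl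
      (fun acc i => max acc (pvCountTotal (pvPrefixSums A) (k - i)
        (min ((A.length : Int) - 1) (max k (k + (m - 2 * i)))))) 0
    = (PySem.List.pyRange 0 (min m k + 1) 1).foldl
      (fun acc i => max acc (PySem.List.slice A (some (k - i))
        (some (min ((A.length : Int) - 1) (max k (k + (m - 2 * i))) + 1))).sum) 0 := by
    apply PySem.List.foldl_congr_mem
    intro acc i hi
    rw [PySem.List.mem_pyRange_one] at hi
    rw [pvCount_eq_slice A (k - i) (min ((A.length : Int) - 1) (max k (k + (m - 2 * i))))
      (by omega) (by omega) (by omega)]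
  rw [h1]
  apply PySem.List.foldl_congr_mem
  intro acc i hi
  rw [PySem.List.mem_pyRange_one] at hi
  rw [pvCount_eq_slice A (max 0 (min k (k - (m - 2 * i)))) (k + i)
    (by omega) (by omega) (by omega)]
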